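-- pv_equiv track=rewrite | github.com/jreyesv063/Plotter | src/utils.py | group_samples
-- ===== SOURCE A (Python) =====
-- def group_samples(sample_keys):
--     """
--     Groups sample keys into categories based on naming patterns.
--
--     Args:
--         sample_keys: List or dict_keys of sample names
--
--     Returns:
--         Dictionary with grouped samples {category: [sample_names]}
--     """
--     groups = {
--         'tt': [],
--         'st': [],
--         'wj': [],
--         'vv': [],
--         'dy': [],
--         'higgs': [],
--         'qcd': [],
--         'data': [],
--     }
--
--     higgs_samples = {'VBFHToWWTo2L2Nu', 'VBFHToWWToLNuQQ', 'GluGluHToWWToLNuQQ'}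
--     vv_samples = {'WW', 'WZ', 'ZZ'}
--
--     for sample in sample_keys:
--         # Skip Signal samples entirely
--         if sample.startswith("Signal"):
--             continue
--
--         # Remove year suffix if present
--         base_name = sample.replace("_2016", "").replace("_2016APV", "")
--
--         if base_name.startswith('TTTo'):
--             groups['tt'].append(sample)
--         elif base_name.startswith('ST'):
--             groups['st'].append(sample)
--         elif base_name.startswith('WJetsToLNu'):
--             groups['wj'].append(sample)
--         elif base_name.startswith('DYJetsToLL'):
--             groups['dy'].append(sample)
--         elif base_name.startswith('QCD'):
--             groups['qcd'].append(sample)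
--         elif base_name in higgs_samples:
--             groups['higgs'].append(sample)
--         elif base_name in vv_samples:
--             groups['vv'].append(sample)
--         elif base_name.startswith(("SingleElectron", "SingleMuon", "Tau", "MET")):
--             groups['data'].append(sample)
--
--     # Remove empty categories
--     return {k: v for k, v in groups.items() if v}
-- ===== SOURCE B (Python) =====
-- # B: table-driven classifier; one pass per category in output order instead of an if/elif cascade.
--
-- _RULES = (
--     ("prefix", "TTTo", "tt"),
--     ("prefix", "ST", "st"),
--     ("prefix", "WJetsToLNu", "wj"),
--     ("prefix", "DYJetsToLL", "dy"),
--     ("prefix", "QCD", "qcd"),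
--     ("member", frozenset({"VBFHToWWTo2L2Nu", "VBFHToWWToLNuQQ", "GluGluHToWWToLNuQQ"}), "higgs"),
--     ("member", frozenset({"WW", "WZ", "ZZ"}), "vv"),
--     ("prefixes", ("SingleElectron", "SingleMuon", "Tau", "MET"), "data"),
-- )
--
-- _ORDER = ("tt", "st", "wj", "vv", "dy", "higgs", "qcd", "data")
--
--
-- def _classify(sample):
--     """Category of one sample, or None (Signal samples and unmatched samples)."""
--     if sample.startswith("Signal"):
--         return None
--     base = sample.replace("_2016", "").replace("_2016APV", "")
--     for kind, pat, cat in _RULES: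
--         if kind == "prefix" or kind == "prefixes":
--             if base.startswith(pat):
--                 return cat
--         else:
--             if base in pat:
--                 return cat
--     return None
--
--
-- def group_samples(sample_keys):
--     samples = list(sample_keys)
--     result = {}
--     for cat in _ORDER:
--         bucket = [s for s in samples if _classify(s) == cat]
--         if bucket:
--             result[cat] = bucket
--     return result
-- ===== Notes on version B (the rewrite author's own statement) =====
-- stated objective: idiomatic
-- what changed: Replaced A's single-pass if/elif cascade mutating a pre-keyed dict with an ordered rule table plus a classify helper, building each output category by its own filter pass in the fixed output order.
import Mathlib
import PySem

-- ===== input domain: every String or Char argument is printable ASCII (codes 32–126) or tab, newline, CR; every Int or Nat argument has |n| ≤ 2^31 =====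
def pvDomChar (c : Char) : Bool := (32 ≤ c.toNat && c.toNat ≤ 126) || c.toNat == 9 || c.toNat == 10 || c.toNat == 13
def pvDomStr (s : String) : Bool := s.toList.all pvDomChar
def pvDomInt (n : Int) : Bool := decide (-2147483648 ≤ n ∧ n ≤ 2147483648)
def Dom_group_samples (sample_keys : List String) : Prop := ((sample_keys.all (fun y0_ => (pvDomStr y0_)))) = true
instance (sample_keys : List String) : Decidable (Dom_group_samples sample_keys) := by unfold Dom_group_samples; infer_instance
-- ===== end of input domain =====

-- B replaces A's if/elif cascade by an ordered rule table with a classify helper and builds each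
-- category by one filter pass in output order (objective: idiomatic/alternative; same result proved).


-- ===== PORT A =====
structure GroupsA where
  tt : List String
  st : List String
  wj : List String
  vv : List String
  dy : List String
  higgs : List String
  qcd : List String
  data : List String
deriving Repr, DecidableEq

def groupsStepA (higgs_samples vv_samples : PySem.Set String) (g : GroupsA) (sample : String) : GroupsA :=
  if PySem.Str.startswith sample "Signal" then g
  else
    let base := PySem.Str.replace (PySem.Str.replace sample "_2016" "") "_2016APV" ""
    if PySem.Str.startswith base "TTTo" then { g with tt := g.tt ++ [sample] }
    else if PySem.Str.startswith base "ST" then { g with st := g.st ++ [sample] }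
    else if PySem.Str.startswith base "WJetsToLNu" then { g with wj := g.wj ++ [sample] }
    else if PySem.Str.startswith base "DYJetsToLL" then { g with dy := g.dy ++ [sample] }
    else if PySem.Str.startswith base "QCD" then { g with qcd := g.qcd ++ [sample] }
    else if PySem.Set.contains higgs_samples base then { g with higgs := g.higgs ++ [sample] }
    else if PySem.Set.contains vv_samples base then { g with vv := g.vv ++ [sample] }
    -- tuple-startswith: any of the prefixes matches
    else if ["SingleElectron", "SingleMuon", "Tau", "MET"].any (fun p => PySem.Str.startswith base p) then
      { g with data := g.data ++ [sample] }
    else g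

def group_samples (sample_keys : List String) : List (String × List String) :=
  let higgs_samples := PySem.Set.ofList ["VBFHToWWTo2L2Nu", "VBFHToWWToLNuQQ", "GluGluHToWWToLNuQQ"]
  let vv_samples := PySem.Set.ofList ["WW", "WZ", "ZZ"]
  let g := sample_keys.foldl (groupsStepA higgs_samples vv_samples)
    ⟨[], [], [], [], [], [], [], []⟩
  ([("tt", g.tt), ("st", g.st), ("wj", g.wj), ("vv", g.vv), ("dy", g.dy),
    ("higgs", g.higgs), ("qcd", g.qcd), ("data", g.data)]).filter (fun kv => !kv.2.isEmpty)

-- ===== PORT B =====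
inductive BMatcher where
  | pfx (p : String)
  | pfxs (ps : List String)
  | member (s : PySem.Set String)
deriving Repr

def bMatches (m : BMatcher) (base : String) : Bool :=
  match m with
  | .pfx p => PySem.Str.startswith base p
  | .pfxs ps => ps.any (fun p => PySem.Str.startswith base p)
  | .member s => PySem.Set.contains s base

def bRules : List (BMatcher × String) :=
  [ (.pfx "TTTo", "tt"),
    (.pfx "ST", "st"),
    (.pfx "WJetsToLNu", "wj"),
    (.pfx "DYJetsToLL", "dy"),
    (.pfx "QCD", "qcd"),
    (.member (PySem.Set.ofList ["VBFHToWWTo2L2Nu", "VBFHToWWToLNuQQ", "GluGluHToWWToLNuQQ"]), "higgs"),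
    (.member (PySem.Set.ofList ["WW", "WZ", "ZZ"]), "vv"),
    (.pfxs ["SingleElectron", "SingleMuon", "Tau", "MET"], "data") ]

def bOrder : List String := ["tt", "st", "wj", "vv", "dy", "higgs", "qcd", "data"]

def bFirstMatch : List (BMatcher × String) → String → Option String
  | [], _ => none
  | (m, cat) :: rest, base => if bMatches m base then some cat else bFirstMatch rest base

def bClassify (sample : String) : Option String :=
  if PySem.Str.startswith sample "Signal" then none
  else bFirstMatch bRules (PySem.Str.replace (PySem.Str.replace sample "_2016" "") "_2016APV" "")

def group_samples_alt (sample_keys : List String) : List (String × List String) :=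
  bOrder.foldl (fun result cat =>
    let bucket := sample_keys.filter (fun s => bClassify s == some cat)
    if bucket.isEmpty then result else result ++ [(cat, bucket)]) []

-- ===== PRECONDITION & SPEC =====
def Spec_group_samples (sample_keys : List String) (out : List (String × List String)) : Prop := out = group_samples_alt sample_keys
instance (sample_keys : List String) (out : List (String × List String)) : Decidable (Spec_group_samples sample_keys out) := by unfold Spec_group_samples; infer_instance

-- ===== CLAIM (what is proved, stated in full; the proofs are below) =====
def Claim_equal_group_samples : Prop := ∀ (sample_keys : List String), Dom_group_samples sample_keys → Spec_group_samples sample_keys (group_samples sample_keys)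

-- ===== LEMMAS AND PROOFS =====

def bucketOf (cat : String) (l : List String) : List String :=
  l.filter (fun s => bClassify s == some cat)

lemma foldB_shape (f : String → List String) (cats : List String)
    (acc : List (String × List String)) :
    cats.foldl (fun r cat => if (f cat).isEmpty then r else r ++ [(cat, f cat)]) acc
      = acc ++ (cats.map (fun c => (c, f c))).filter (fun kv => !kv.2.isEmpty) := by
  induction cats generalizing acc with
  | nil => simp
  | cons c cs ih =>
    simp only [List.foldl_cons, List.map_cons, List.filter_cons, ih]
    by_cases h : (f c).isEmpty <;> simp [h]

lemma foldA_char (l : List String) (g : GroupsA) :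
    l.foldl (groupsStepA (PySem.Set.ofList ["VBFHToWWTo2L2Nu", "VBFHToWWToLNuQQ", "GluGluHToWWToLNuQQ"])
                         (PySem.Set.ofList ["WW", "WZ", "ZZ"])) g
      = ⟨g.tt ++ bucketOf "tt" l, g.st ++ bucketOf "st" l, g.wj ++ bucketOf "wj" l,
         g.vv ++ bucketOf "vv" l, g.dy ++ bucketOf "dy" l, g.higgs ++ bucketOf "higgs" l,
         g.qcd ++ bucketOf "qcd" l, g.data ++ bucketOf "data" l⟩ := by
  induction l generalizing g with
  | nil => simp [bucketOf]
  | cons x xs ih =>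
    simp only [List.foldl_cons, groupsStepA]
    split_ifs with h1 h2 h3 h4 h5 h6 h7 h8 h9
    · have hc : bClassify x = none := by
        simp only [bClassify, bRules, bFirstMatch, bMatches]
        rw [if_pos h1]
      rw [ih]; simp [bucketOf, hc]
    · have hc : bClassify x = some "tt" := by
        simp only [bClassify, bRules, bFirstMatch, bMatches]
        rw [if_neg h1, if_pos h2]
      rw [ih]; simp [bucketOf, hc]
    · have hc : bClassify x = some "st" := by
        simp only [bClassify, bRules, bFirstMatch, bMatches]
        rw [if_neg h1, if_neg h2, if_pos h3]
      rw [ih]; simp [bucketOf, hc]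
    · have hc : bClassify x = some "wj" := by
        simp only [bClassify, bRules, bFirstMatch, bMatches]
        rw [if_neg h1, if_neg h2, if_neg h3, if_pos h4]
      rw [ih]; simp [bucketOf, hc]
    · have hc : bClassify x = some "dy" := by
        simp only [bClassify, bRules, bFirstMatch, bMatches]
        rw [if_neg h1, if_neg h2, if_neg h3, if_neg h4, if_pos h5]
      rw [ih]; simp [bucketOf, hc]
    · have hc : bClassify x = some "qcd" := by
        simp only [bClassify, bRules, bFirstMatch, bMatches]
        rw [if_neg h1, if_neg h2, if_neg h3, if_neg h4, if_neg h5, if_pos h6]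
      rw [ih]; simp [bucketOf, hc]
    · have hc : bClassify x = some "higgs" := by
        simp only [bClassify, bRules, bFirstMatch, bMatches]
        rw [if_neg h1, if_neg h2, if_neg h3, if_neg h4, if_neg h5, if_neg h6, if_pos h7]
      rw [ih]; simp [bucketOf, hc]
    · have hc : bClassify x = some "vv" := by
        simp only [bClassify, bRules, bFirstMatch, bMatches]
        rw [if_neg h1, if_neg h2, if_neg h3, if_neg h4, if_neg h5, if_neg h6, if_neg h7, if_pos h8]
      rw [ih]; simp [bucketOf, hc]
    · have hc : bClassify x = some "data" := by
        simp only [bClassify, bRules, bFirstMatch, bMatches]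
        rw [if_neg h1, if_neg h2, if_neg h3, if_neg h4, if_neg h5, if_neg h6, if_neg h7, if_neg h8, if_pos h9]
      rw [ih]; simp [bucketOf, hc]
    · have hc : bClassify x = none := by
        simp only [bClassify, bRules, bFirstMatch, bMatches]
        rw [if_neg h1, if_neg h2, if_neg h3, if_neg h4, if_neg h5, if_neg h6, if_neg h7, if_neg h8, if_neg h9]
      rw [ih]; simp [bucketOf, hc]

theorem group_samples_spec : Claim_equal_group_samples := by
  intro sample_keys _
  unfold Spec_group_samples group_samples group_samples_alt
  rw [foldB_shape (fun cat => sample_keys.filter (fun s => bClassify s == some cat)) bOrder []]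
  simp [foldA_char, bucketOf, bOrder]

-- ===== VERDICT (by name: the statement is the Claim_ definition above) =====
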